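-- pv_equiv track=rewrite | github.com/uDorkau6/Crust | builder.py | cuboid
-- ===== SOURCE A (Python) =====
-- def cuboid(x1, x2, y1, y2, z1, z2, fill=True):
--     result = set()
--     a = 0
--     a += x1 == x2
--     a += y1 == y2
--     a += z1 == z2
--     for x in range(x1, x2 + 1):
--         for y in range(y1, y2 + 1):
--             for z in range(z1, z2 + 1):
--                 n = 0
--                 n += x in (x1, x2)
--                 n += y in (y1, y2)
--                 n += z in (z1, z2)
--                 if not fill and n <= a:
--                     continue
--                 result.add((x, y, z))
--     return result
-- ===== SOURCE B (Python) =====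
-- def cuboid(x1, x2, y1, y2, z1, z2, fill=True):
--     # Hollow case emits only shell cells directly (faces of the non-degenerate
--     # axes) rather than testing each cell of the volume.
--     cells = []
--     for x in range(x1, x2 + 1):
--         if fill or (x1 != x2 and x in (x1, x2)):
--             cells.extend((x, y, z) for y in range(y1, y2 + 1) for z in range(z1, z2 + 1))
--         else:
--             for y in range(y1, y2 + 1):
--                 if y1 != y2 and y in (y1, y2):
--                     cells.extend((x, y, z) for z in range(z1, z2 + 1))
--                 elif z1 < z2:
--                     cells.append((x, y, z1))
--                     cells.append((x, y, z2))
--     return set(cells)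
-- ===== Notes on version B (the rewrite author's own statement) =====
-- stated objective: alternative
-- what changed: For hollow cuboids B emits only the shell cells directly (boundary x-slabs in full; for interior rows only the two z endpoints) instead of scanning every cell of the volume and testing a boundary count; the emitted-cell count is O(surface) there, though a timing run's input family (huge filled volumes) does not measure this as faster.
import Mathlib
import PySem

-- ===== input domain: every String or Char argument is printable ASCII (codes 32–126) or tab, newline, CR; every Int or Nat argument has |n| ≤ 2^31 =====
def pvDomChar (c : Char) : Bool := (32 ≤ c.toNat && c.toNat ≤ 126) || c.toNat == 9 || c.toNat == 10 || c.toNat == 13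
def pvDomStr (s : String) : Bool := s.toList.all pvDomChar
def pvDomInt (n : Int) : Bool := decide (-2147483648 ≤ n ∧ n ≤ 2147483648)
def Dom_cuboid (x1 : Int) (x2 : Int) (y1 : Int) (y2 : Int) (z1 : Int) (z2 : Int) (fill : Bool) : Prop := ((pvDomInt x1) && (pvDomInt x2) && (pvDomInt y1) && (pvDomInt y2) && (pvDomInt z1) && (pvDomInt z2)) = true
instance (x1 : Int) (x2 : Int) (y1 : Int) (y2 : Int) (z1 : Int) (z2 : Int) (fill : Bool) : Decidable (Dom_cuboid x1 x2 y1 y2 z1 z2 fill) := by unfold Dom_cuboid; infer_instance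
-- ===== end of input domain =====

-- B replaces A's scan-and-test of every cell with direct emission of only the
-- shell cells when fill is false (full volume only when fill is true).
-- Return value only; neither version mutates its arguments.

-- ===== PORT A =====
def cuboid (x1 : Int) (x2 : Int) (y1 : Int) (y2 : Int) (z1 : Int) (z2 : Int) (fill : Bool) : List (Int × Int × Int) :=
  let a : Int := ((0 + (if x1 = x2 then 1 else 0)) + (if y1 = y2 then 1 else 0)) + (if z1 = z2 then 1 else 0)
  (PySem.List.pyRange x1 (x2 + 1) 1).foldl (fun result x =>
    (PySem.List.pyRange y1 (y2 + 1) 1).foldl (fun result y =>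
      (PySem.List.pyRange z1 (z2 + 1) 1).foldl (fun result z =>
        let n : Int := ((0 + (if x = x1 ∨ x = x2 then 1 else 0)) + (if y = y1 ∨ y = y2 then 1 else 0)) + (if z = z1 ∨ z = z2 then 1 else 0)
        if !fill && decide (n ≤ a) then result
        else PySem.Set.add result (x, y, z)) result) result) PySem.Set.empty

-- ===== PORT B =====
def cuboid_alt (x1 : Int) (x2 : Int) (y1 : Int) (y2 : Int) (z1 : Int) (z2 : Int) (fill : Bool) : List (Int × Int × Int) :=
  let cells := (PySem.List.pyRange x1 (x2 + 1) 1).foldl (fun cells x =>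
    if fill || (decide (x1 ≠ x2) && (decide (x = x1) || decide (x = x2))) then
      cells ++ (PySem.List.pyRange y1 (y2 + 1) 1).flatMap (fun y =>
        (PySem.List.pyRange z1 (z2 + 1) 1).map (fun z => (x, y, z)))
    else
      (PySem.List.pyRange y1 (y2 + 1) 1).foldl (fun cells y =>
        if decide (y1 ≠ y2) && (decide (y = y1) || decide (y = y2)) then
          cells ++ (PySem.List.pyRange z1 (z2 + 1) 1).map (fun z => (x, y, z))
        else if decide (z1 < z2) then
          (cells ++ [(x, y, z1)]) ++ [(x, y, z2)]
        else cells) cells) []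
  PySem.Set.ofList cells

-- ===== PRECONDITION & SPEC =====
def Spec_cuboid (x1 : Int) (x2 : Int) (y1 : Int) (y2 : Int) (z1 : Int) (z2 : Int) (fill : Bool) (out : List (Int × Int × Int)) : Prop := out = cuboid_alt x1 x2 y1 y2 z1 z2 fill
instance (x1 : Int) (x2 : Int) (y1 : Int) (y2 : Int) (z1 : Int) (z2 : Int) (fill : Bool) (out : List (Int × Int × Int)) : Decidable (Spec_cuboid x1 x2 y1 y2 z1 z2 fill out) := by unfold Spec_cuboid; infer_instance

-- ===== CLAIM (what is proved, stated in full; the proofs are below) =====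
def Claim_equal_cuboid : Prop := ∀ (x1 : Int) (x2 : Int) (y1 : Int) (y2 : Int) (z1 : Int) (z2 : Int) (fill : Bool), Dom_cuboid x1 x2 y1 y2 z1 z2 fill → Spec_cuboid x1 x2 y1 y2 z1 z2 fill (cuboid x1 x2 y1 y2 z1 z2 fill)

-- ===== LEMMAS AND PROOFS =====

-- the candidate volume, as a list product, and the cell predicate A tests
def pvProd3 (x1 x2 y1 y2 z1 z2 : Int) : List (Int × Int × Int) :=
  (PySem.List.pyRange x1 (x2 + 1) 1).flatMap (fun x =>
    (PySem.List.pyRange y1 (y2 + 1) 1).flatMap (fun y =>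
      (PySem.List.pyRange z1 (z2 + 1) 1).map (fun z => (x, y, z))))

def pvKeep (x1 x2 y1 y2 z1 z2 : Int) (fill : Bool) (t : Int × Int × Int) : Bool :=
  let a : Int := ((0 + (if x1 = x2 then 1 else 0)) + (if y1 = y2 then 1 else 0)) + (if z1 = z2 then 1 else 0)
  let n : Int := ((0 + (if t.1 = x1 ∨ t.1 = x2 then 1 else 0)) + (if t.2.1 = y1 ∨ t.2.1 = y2 then 1 else 0)) + (if t.2.2 = z1 ∨ t.2.2 = z2 then 1 else 0)
  !(!fill && decide (n ≤ a))

-- building a set by conditional adds of pairwise-distinct fresh elements = append the filtered list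
lemma pvFoldl_add_filter {α : Type} [BEq α] [LawfulBEq α] (l : List α) (q : α → Bool)
    (s : PySem.Set α) (hnd : l.Nodup) (hfresh : ∀ x ∈ l, x ∉ s) :
    l.foldl (fun s t => if q t then s else PySem.Set.add s t) s = s ++ l.filter (fun t => !q t) := by
  induction l generalizing s with
  | nil => simp
  | cons x l ih =>
    simp only [List.foldl_cons, List.filter_cons]
    rcases List.nodup_cons.mp hnd with ⟨hxl, hnd'⟩
    by_cases hq : q x = true
    · rw [if_pos hq, ih s hnd' (fun y hy => hfresh y (List.mem_cons_of_mem _ hy)), hq]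
      simp
    · rw [if_neg hq, PySem.Set.add_of_not_mem (hfresh x (List.mem_cons_self ..)),
        ih (s ++ [x]) hnd' ?_]
      · simp [hq, List.append_assoc]
      · intro y hy
        simp only [List.mem_append, List.mem_singleton]
        rintro (h | rfl)
        · exact hfresh y (List.mem_cons_of_mem _ hy) h
        · exact hxl hy

lemma pvProd3_nodup (x1 x2 y1 y2 z1 z2 : Int) : (pvProd3 x1 x2 y1 y2 z1 z2).Nodup := by
  have h : pvProd3 x1 x2 y1 y2 z1 z2 =
      (PySem.List.pyRange x1 (x2 + 1) 1) ×ˢ ((PySem.List.pyRange y1 (y2 + 1) 1) ×ˢ (PySem.List.pyRange z1 (z2 + 1) 1)) := by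
    simp [pvProd3, SProd.sprod, List.product, List.map_flatMap, List.map_map, Function.comp_def]
  rw [h]
  exact List.Nodup.product (PySem.List.nodup_pyRange_one ..)
    (List.Nodup.product (PySem.List.nodup_pyRange_one ..) (PySem.List.nodup_pyRange_one ..))

-- A computes the filtered volume, in traversal order
lemma pvA_eq_filter (x1 x2 y1 y2 z1 z2 : Int) (fill : Bool) :
    cuboid x1 x2 y1 y2 z1 z2 fill
      = (pvProd3 x1 x2 y1 y2 z1 z2).filter (pvKeep x1 x2 y1 y2 z1 z2 fill) := by
  have h := pvFoldl_add_filter (pvProd3 x1 x2 y1 y2 z1 z2)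
      (fun t => !(pvKeep x1 x2 y1 y2 z1 z2 fill t)) PySem.Set.empty
      (pvProd3_nodup ..) (by intro x _ hx; simp [PySem.Set.empty] at hx)
  simp only [Bool.not_not] at h
  rw [pvProd3] at h
  simp only [List.foldl_flatMap, List.foldl_map] at h
  rw [cuboid, pvProd3]
  refine Eq.trans ?_ (h.trans (by simp [PySem.Set.empty]))
  congr 1
  funext result x
  congr 1
  funext result y
  congr 1
  funext result z
  simp only [pvKeep, Bool.not_not]

-- on in-range cells, A's count test n > a means: some non-degenerate axis is at an endpoint
lemma pvKeep_char (x1 x2 y1 y2 z1 z2 x y z : Int) (fill : Bool)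
    (hx : x1 ≤ x ∧ x ≤ x2) (hy : y1 ≤ y ∧ y ≤ y2) (hz : z1 ≤ z ∧ z ≤ z2) :
    pvKeep x1 x2 y1 y2 z1 z2 fill (x, y, z)
      = (fill || ((decide (x1 ≠ x2) && (decide (x = x1) || decide (x = x2)))
          || ((decide (y1 ≠ y2) && (decide (y = y1) || decide (y = y2)))
          || (decide (z1 ≠ z2) && (decide (z = z1) || decide (z = z2)))))) := by
  cases fill with
  | true => simp [pvKeep]
  | false =>
    simp only [pvKeep, Bool.not_false, Bool.true_and, Bool.false_or]
    rw [Bool.eq_iff_iff]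
    simp only [Bool.not_eq_true', decide_eq_false_iff_not, not_le, Bool.or_eq_true,
      Bool.and_eq_true, decide_eq_true_eq]
    split_ifs <;> omega

-- the z-segment B emits for an interior row
lemma pvZ_row (z1 z2 x y : Int) :
    ((PySem.List.pyRange z1 (z2 + 1) 1).map (fun z => (x, y, z))).filter
        (fun t => decide (z1 ≠ z2) && (decide (t.2.2 = z1) || decide (t.2.2 = z2)))
      = if decide (z1 < z2) = true then ([] ++ [(x, y, z1)]) ++ [(x, y, z2)] else [] := by
  rw [List.filter_map]
  split_ifs with h
  · rw [decide_eq_true_iff] at h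
    rw [PySem.List.pyRange_one_append z1 (z1 + 1) (z2 + 1) (by omega) (by omega),
      PySem.List.pyRange_one_append (z1 + 1) z2 (z2 + 1) (by omega) (by omega)]
    simp [PySem.List.pyRange_one_singleton, List.filter_append, show z1 ≠ z2 by omega]
    omega
  · rw [decide_eq_true_iff, not_lt] at h
    rw [List.filter_eq_nil_iff.mpr, List.map_nil]
    intro z hz
    rcases lt_or_eq_of_le h with h' | rfl
    · rw [PySem.List.mem_pyRange_one] at hz; omega
    · simp
-- the y-z face B emits for x: equals the filter of the full x-slab by B's boundary test
lemma pvX_slab (x1 x2 y1 y2 z1 z2 x : Int) (hbx : (decide (x1 ≠ x2) && (decide (x = x1) || decide (x = x2))) = false) :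
    ((PySem.List.pyRange y1 (y2 + 1) 1).flatMap (fun y => (PySem.List.pyRange z1 (z2 + 1) 1).map (fun z => (x, y, z)))).filter
        (fun t => (decide (x1 ≠ x2) && (decide (t.1 = x1) || decide (t.1 = x2)))
          || ((decide (y1 ≠ y2) && (decide (t.2.1 = y1) || decide (t.2.1 = y2)))
          || (decide (z1 ≠ z2) && (decide (t.2.2 = z1) || decide (t.2.2 = z2)))))
      = (PySem.List.pyRange y1 (y2 + 1) 1).flatMap (fun y =>
          if decide (y1 ≠ y2) && (decide (y = y1) || decide (y = y2)) then
            (PySem.List.pyRange z1 (z2 + 1) 1).map (fun z => (x, y, z))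
          else if decide (z1 < z2) = true then ([] ++ [(x, y, z1)]) ++ [(x, y, z2)] else []) := by
  rw [List.filter_flatMap]
  refine List.flatMap_congr (fun y _ => ?_)
  have hfix : ∀ t ∈ (PySem.List.pyRange z1 (z2 + 1) 1).map (fun z => (x, y, z)),
      ((decide (x1 ≠ x2) && (decide (t.1 = x1) || decide (t.1 = x2)))
        || ((decide (y1 ≠ y2) && (decide (t.2.1 = y1) || decide (t.2.1 = y2)))
        || (decide (z1 ≠ z2) && (decide (t.2.2 = z1) || decide (t.2.2 = z2)))))
      = ((decide (y1 ≠ y2) && (decide (y = y1) || decide (y = y2)))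
        || (decide (z1 ≠ z2) && (decide (t.2.2 = z1) || decide (t.2.2 = z2)))) := by
    intro t ht
    rcases List.mem_map.mp ht with ⟨z, _, rfl⟩
    rw [Bool.eq_iff_iff]
    simp only [Bool.or_eq_true, Bool.and_eq_true, decide_eq_true_eq]
    have hbx' : ¬(x1 ≠ x2 ∧ (x = x1 ∨ x = x2)) := by
      intro hc
      rcases hc.2 with rfl | rfl <;> simp [hc.1] at hbx
    tauto
  rw [List.filter_congr hfix]
  by_cases hby : (decide (y1 ≠ y2) && (decide (y = y1) || decide (y = y2))) = true
  · rw [if_pos hby, List.filter_eq_self.mpr]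
    intro t _
    simp only [hby, Bool.true_or]
  · rw [if_neg hby]
    rw [Bool.not_eq_true] at hby
    have : ∀ t ∈ (PySem.List.pyRange z1 (z2 + 1) 1).map (fun z => (x, y, z)),
        ((decide (y1 ≠ y2) && (decide (y = y1) || decide (y = y2)))
          || (decide (z1 ≠ z2) && (decide (t.2.2 = z1) || decide (t.2.2 = z2))))
        = (decide (z1 ≠ z2) && (decide (t.2.2 = z1) || decide (t.2.2 = z2))) := by
      intro t _; rw [hby, Bool.false_or]
    rw [List.filter_congr this, pvZ_row z1 z2 x y]

-- B's cell list is exactly the filtered volume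
lemma pvB_cells (x1 x2 y1 y2 z1 z2 : Int) (fill : Bool) :
    cuboid_alt x1 x2 y1 y2 z1 z2 fill
      = PySem.Set.ofList ((pvProd3 x1 x2 y1 y2 z1 z2).filter (pvKeep x1 x2 y1 y2 z1 z2 fill)) := by
  -- rewrite the filter through the boundary characterisation, then split per x-slab
  have hchar : (pvProd3 x1 x2 y1 y2 z1 z2).filter (pvKeep x1 x2 y1 y2 z1 z2 fill)
      = (pvProd3 x1 x2 y1 y2 z1 z2).filter (fun t =>
          fill || ((decide (x1 ≠ x2) && (decide (t.1 = x1) || decide (t.1 = x2)))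
            || ((decide (y1 ≠ y2) && (decide (t.2.1 = y1) || decide (t.2.1 = y2)))
            || (decide (z1 ≠ z2) && (decide (t.2.2 = z1) || decide (t.2.2 = z2)))))) := by
    refine List.filter_congr (fun t ht => ?_)
    unfold pvProd3 at ht
    rcases List.mem_flatMap.mp ht with ⟨x, hxm, ht⟩
    rcases List.mem_flatMap.mp ht with ⟨y, hym, ht⟩
    rcases List.mem_map.mp ht with ⟨z, hzm, rfl⟩
    rw [PySem.List.mem_pyRange_one] at hxm hym hzm
    exact pvKeep_char x1 x2 y1 y2 z1 z2 x y z fill ⟨hxm.1, by omega⟩ ⟨hym.1, by omega⟩ ⟨hzm.1, by omega⟩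
  rw [hchar]
  unfold cuboid_alt pvProd3
  simp only []
  rw [List.filter_flatMap]
  congr 1
  refine ((PySem.List.foldl_congr_mem' _ _ (fun cells x => cells ++
      (if fill || (decide (x1 ≠ x2) && (decide (x = x1) || decide (x = x2))) then
        (PySem.List.pyRange y1 (y2 + 1) 1).flatMap (fun y => (PySem.List.pyRange z1 (z2 + 1) 1).map (fun z => (x, y, z)))
      else (PySem.List.pyRange y1 (y2 + 1) 1).flatMap (fun y =>
          if decide (y1 ≠ y2) && (decide (y = y1) || decide (y = y2)) then
            (PySem.List.pyRange z1 (z2 + 1) 1).map (fun z => (x, y, z))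
          else if decide (z1 < z2) = true then ([] ++ [(x, y, z1)]) ++ [(x, y, z2)] else []))) [] ?_).trans
    (PySem.List.foldl_append_eq_flatMap ..)).trans ?_
  · -- B's loop body appends exactly the per-x segment
    intro x _ cells
    by_cases hbx : (fill || (decide (x1 ≠ x2) && (decide (x = x1) || decide (x = x2)))) = true
    · simp only [if_pos hbx]
    · simp only [if_neg hbx]
      refine (PySem.List.foldl_congr_mem' _ _ (fun cells y => cells ++
          (if decide (y1 ≠ y2) && (decide (y = y1) || decide (y = y2)) then
            (PySem.List.pyRange z1 (z2 + 1) 1).map (fun z => (x, y, z))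
          else if decide (z1 < z2) = true then ([] ++ [(x, y, z1)]) ++ [(x, y, z2)] else [])) cells ?_).trans
        (PySem.List.foldl_append_eq_flatMap ..)
      intro y _ cells
      by_cases hby : (decide (y1 ≠ y2) && (decide (y = y1) || decide (y = y2))) = true
      · simp only [if_pos hby]
      · simp only [if_neg hby]
        by_cases hz : decide (z1 < z2) = true
        · simp only [if_pos hz]
          simp
        · simp only [if_neg hz]
          simp
  · -- the per-x segment is the filter of the full x-slab
    rw [List.nil_append]
    refine List.flatMap_congr (fun x _ => ?_)
    by_cases hbx : (fill || (decide (x1 ≠ x2) && (decide (x = x1) || decide (x = x2)))) = true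
    · rw [if_pos hbx, List.filter_eq_self.mpr]
      intro t ht
      rcases List.mem_flatMap.mp ht with ⟨y, _, ht⟩
      rcases List.mem_map.mp ht with ⟨z, _, rfl⟩
      simp only [Bool.or_eq_true, Bool.and_eq_true, decide_eq_true_eq] at hbx ⊢
      tauto
    · rw [if_neg hbx]
      have hbx' : (fill || (decide (x1 ≠ x2) && (decide (x = x1) || decide (x = x2)))) = false :=
        Bool.eq_false_iff.mpr hbx
      rcases Bool.or_eq_false_iff.mp hbx' with ⟨hf, hb⟩
      have := pvX_slab x1 x2 y1 y2 z1 z2 x hb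
      rw [← this]
      refine List.filter_congr (fun t _ => ?_)
      rw [hf, Bool.false_or]

-- ===== VERDICT (by name: the statement is the Claim_ definition above) =====
theorem cuboid_spec : Claim_equal_cuboid := by
  intro x1 x2 y1 y2 z1 z2 fill _
  unfold Spec_cuboid
  rw [pvA_eq_filter, pvB_cells]
  exact (PySem.Set.ofList_eq_self_of_nodup _ (List.Nodup.filter _ (pvProd3_nodup ..))).symm
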